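-- pv_equiv track=rewrite | github.com/mepear/MOMAPF | libmomapf/utils.py | ndcomax
-- ===== SOURCE A (Python) =====
-- def tr(val):
--     return val[1:]
--
-- def is_weakly_dominated(vec1, vec2):
--     for n1, n2 in zip(vec1, vec2):
--         if n1 < n2:
--             return False
--     return True
--
-- def is_weakly_dominated_it(vec, vec_list):
--     for vec_2 in vec_list:
--         if is_weakly_dominated(vec, vec_2):
--             return True
--
--     return False
--
-- def update_list_it(vec_list, vec):
--     vec_list = [vec] + [v for v in vec_list if not is_weakly_dominated(v, vec)]
--     return vec_list
--
-- def comax(v1, v2):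
--     # Assumption: v1 and any v2 in V2 only contain non-negative component
--     # V2 is sorted lexicographically
--
--     return tuple(max(n1, n2) for n1, n2 in zip(v1, v2))
--
-- def ndcomax(v1, V2):
--     # Assumption: v1 and any v2 in V2 only contain non-negative component
--     # V2 is sorted lexicographically
--
--     res = []
--     tr_vecs = []
--
--     for new_vec in sorted(comax(v1, v2) for v2 in V2):
-- #         new_vec = vec_max(v1, v2)
--         if is_weakly_dominated_it(tr(new_vec), tr_vecs):
--             continue
--         res.append(new_vec)
--         tr_vecs = update_list_it(tr_vecs, tr(new_vec))
--
--     return res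
-- ===== SOURCE B (Python) =====
-- def ndcomax(v1, V2):
--     vecs = sorted(set(tuple(max(a, b) for a, b in zip(v1, v2)) for v2 in V2))
--     return [w for w in vecs
--             if not any(u < w and all(x <= y for x, y in zip(u, w)) for u in vecs)]
-- ===== Notes on version B (the rewrite author's own statement) =====
-- stated objective: simpler
-- what changed: B deduplicates the comax vectors with sorted(set(...)) and keeps a vector iff no lexicographically smaller vector in the set dominates it componentwise on FULL vectors, replacing A's incrementally maintained Pareto frontier of TRUNCATED vectors (tr/update_list_it) with a plain pairwise scan. Pre_ excludes ragged inputs on which the comax vectors have several unequal nonzero lengths: there Python's zip-truncated comparisons make A's truncated-frontier pruning an accidental artefact (both keep-sets are defensible).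
-- outside the precondition, e.g. on ndcomax((0, 1), [(1,), (3, 2), (0, 3)]): A returns [(0, 3), (3, 2)], B returns [(0, 3)]
import Mathlib
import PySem

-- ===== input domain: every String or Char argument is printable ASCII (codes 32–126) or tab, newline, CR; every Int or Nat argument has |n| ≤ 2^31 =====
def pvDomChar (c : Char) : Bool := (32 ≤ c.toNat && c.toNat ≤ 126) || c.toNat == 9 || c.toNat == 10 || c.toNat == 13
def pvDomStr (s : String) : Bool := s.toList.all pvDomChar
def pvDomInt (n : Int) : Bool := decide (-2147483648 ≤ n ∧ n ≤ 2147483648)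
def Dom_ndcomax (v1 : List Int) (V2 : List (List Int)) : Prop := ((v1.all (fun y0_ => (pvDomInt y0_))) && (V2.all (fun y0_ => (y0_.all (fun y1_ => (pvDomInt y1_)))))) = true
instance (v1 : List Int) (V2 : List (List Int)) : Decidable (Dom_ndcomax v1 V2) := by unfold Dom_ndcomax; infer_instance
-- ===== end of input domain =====

-- B replaces A's incrementally maintained frontier of truncated vectors by a plain pairwise
-- full-vector dominance scan over the deduplicated sorted comax vectors (objective: simpler).

-- ===== PORT A =====
-- tr(val) = val[1:]
def trA (val : List Int) : List Int := PySem.List.slice val (some 1)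
-- is_weakly_dominated(vec1, vec2): False iff some n1 < n2
def wdomA (vec1 vec2 : List Int) : Bool := (vec1.zip vec2).all (fun p => !(decide (p.1 < p.2)))
def wdomItA (vec : List Int) (vecList : List (List Int)) : Bool := vecList.any (fun vec2 => wdomA vec vec2)
def updateListItA (vecList : List (List Int)) (vec : List Int) : List (List Int) := vec :: vecList.filter (fun v => !(wdomA v vec))
def comaxA (v1 v2 : List Int) : List Int := (v1.zip v2).map (fun p => max p.1 p.2)
def ndcomax (v1 : List Int) (V2 : List (List Int)) : List (List Int) :=
  ((PySem.List.sorted (V2.map (fun v2 => comaxA v1 v2)) (fun x => x) false).foldl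
    (fun (st : List (List Int) × List (List Int)) new =>
      if wdomItA (trA new) st.2 then st
      else (st.1 ++ [new], updateListItA st.2 (trA new)))
    ([], [])).1

-- ===== PORT B =====
def leB (u w : List Int) : Bool := (u.zip w).all (fun p => decide (p.1 ≤ p.2))
def comaxB (v1 v2 : List Int) : List Int := (v1.zip v2).map (fun p => max p.1 p.2)
def ndcomax_alt (v1 : List Int) (V2 : List (List Int)) : List (List Int) :=
  let vecs := PySem.List.sorted (PySem.Set.ofList (V2.map (fun v2 => comaxB v1 v2))) (fun x => x) false
  vecs.filter (fun w => !(vecs.any (fun u => decide (u < w) && leB u w)))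

-- ===== PRECONDITION & SPEC =====
-- Pre_ excludes ragged inputs on which the comax vectors have several unequal nonzero lengths:
-- there Python's zip-truncated comparisons make A's truncated-frontier pruning an accidental artefact.
def Pre_ndcomax (v1 : List Int) (V2 : List (List Int)) : Prop :=
  (∀ a ∈ V2, ∀ b ∈ V2, min a.length v1.length = min b.length v1.length)
  ∨ (∃ a ∈ V2, min a.length v1.length = 0)
instance (v1 : List Int) (V2 : List (List Int)) : Decidable (Pre_ndcomax v1 V2) := by unfold Pre_ndcomax; infer_instance
def pvWitness_ndcomax : List Int × List (List Int) := ([1, 2], [[0, 3], [2, 1]])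
def Spec_ndcomax (v1 : List Int) (V2 : List (List Int)) (out : List (List Int)) : Prop := out = ndcomax_alt v1 V2
instance (v1 : List Int) (V2 : List (List Int)) (out : List (List Int)) : Decidable (Spec_ndcomax v1 V2 out) := by unfold Spec_ndcomax; infer_instance

-- ===== CLAIM (what is proved, stated in full; the proofs are below) =====
def Claim_equal_ndcomax : Prop := ∀ (v1 : List Int) (V2 : List (List Int)), Dom_ndcomax v1 V2 → Pre_ndcomax v1 V2 → Spec_ndcomax v1 V2 (ndcomax v1 V2)

-- ===== LEMMAS AND PROOFS =====

theorem trA_eq (v : List Int) : trA v = v.drop 1 := by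
  simpa using PySem.List.slice_from v (a := 1) (by norm_num)

theorem leB_iff (u w : List Int) :
    leB u w = true ↔ ∀ i (h1 : i < u.length) (h2 : i < w.length), u[i] ≤ w[i] := by
  rw [leB, List.all_eq_true]
  constructor
  · intro h i h1 h2
    have hi : i < (u.zip w).length := by simp [List.length_zip]; omega
    have := h (u.zip w)[i] (List.getElem_mem hi)
    simpa [List.getElem_zip] using this
  · intro h x hx
    obtain ⟨i, hi, rfl⟩ := List.mem_iff_getElem.mp hx
    have h1 : i < u.length := by simp [List.length_zip] at hi; omega
    have h2 : i < w.length := by simp [List.length_zip] at hi; omega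
    simp [List.getElem_zip]
    exact h i h1 h2

theorem wdom_iff_leB (a b : List Int) : wdomA a b = true ↔ leB b a = true := by
  rw [wdomA, List.all_eq_true, leB_iff]
  constructor
  · intro h i h1 h2
    have hi : i < (a.zip b).length := by simp [List.length_zip]; omega
    have := h (a.zip b)[i] (List.getElem_mem hi)
    simp [List.getElem_zip] at this
    omega
  · intro h x hx
    obtain ⟨i, hi, rfl⟩ := List.mem_iff_getElem.mp hx
    have h1 : i < a.length := by simp [List.length_zip] at hi; omega
    have h2 : i < b.length := by simp [List.length_zip] at hi; omega
    have := h i h2 h1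
    simp [List.getElem_zip]
    omega

theorem leB_refl (w : List Int) : leB w w = true := by
  rw [leB_iff]; intro i h1 h2; exact le_refl _

theorem leB_trans {u v w : List Int} (hlen : u.length = v.length)
    (h1 : leB u v = true) (h2 : leB v w = true) : leB u w = true := by
  rw [leB_iff] at *
  intro i hi1 hi2
  have hv : i < v.length := hlen ▸ hi1
  exact le_trans (h1 i hi1 hv) (h2 i hv hi2)

theorem leB_tail {u w : List Int} (h : leB u w = true) :
    leB (u.drop 1) (w.drop 1) = true := by
  rw [leB_iff] at *
  intro i h1 h2
  simp only [List.getElem_drop]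
  have := h (1 + i) (by simp at h1; omega) (by simp at h2; omega)
  simpa [Nat.add_comm] using this

theorem leB_cons (a b : Int) (u w : List Int) :
    leB (a :: u) (b :: w) = (decide (a ≤ b) && leB u w) := by
  simp [leB, List.zip_cons_cons]

theorem leB_lt {u w : List Int} (hlen : u.length = w.length)
    (h : leB u w = true) (hne : u ≠ w) : u < w := by
  induction u generalizing w with
  | nil =>
    cases w with
    | nil => exact absurd rfl hne
    | cons b w' => simp at hlen
  | cons a u' ih =>
    cases w with
    | nil => simp at hlen
    | cons b w' =>
      rw [leB_cons, Bool.and_eq_true, decide_eq_true_eq] at h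
      rcases lt_or_eq_of_le h.1 with hab | rfl
      · exact List.Lex.rel hab
      · have : u' ≠ w' := by intro he; exact hne (by rw [he])
        exact List.Lex.cons (ih (by simpa using hlen) h.2 this)

theorem leB_of_le_of_tail {u w : List Int} (hlen : u.length = w.length)
    (hle : u ≤ w) (ht : leB (u.drop 1) (w.drop 1) = true) : leB u w = true := by
  cases u with
  | nil =>
    cases w with
    | nil => rfl
    | cons b w' => simp at hlen
  | cons a u' =>
    cases w with
    | nil => simp at hlen
    | cons b w' =>
      have hab : a ≤ b := by
        by_contra hab
        have : (b :: w') < (a :: u') := List.Lex.rel (lt_of_not_ge hab)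
        exact absurd hle (not_le_of_gt this)
      rw [leB_cons, Bool.and_eq_true, decide_eq_true_eq]
      exact ⟨hab, by simpa using ht⟩

-- instance-alignment: the ports elaborate `sorted` with core's List LT instances,
-- the PySem order lemmas with the LinearOrder ones; the two are definitionally equal
theorem sorted_inst (xs : List (List Int)) (key : List Int → List Int) (rev : Bool) :
    @PySem.List.sorted (List Int) (List Int) List.instLT (fun a b => a.decidableLT b) xs key rev
      = @PySem.List.sorted (List Int) (List Int) List.instLinearOrder.toLT LinearOrder.toDecidableLT xs key rev := by
  have hdec : (fun (a b : List Int) => a.decidableLT b) = (LinearOrder.toDecidableLT (α := List Int)) := by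
    funext a b; exact Subsingleton.elim _ _
  exact congrFun (congrFun (congrFun (congrArg (@PySem.List.sorted (List Int) (List Int) List.instLinearOrder.toLT) hdec) xs) key) rev

theorem foldl_add_sublist (xs : List (List Int)) : ∀ (S : List (List Int)),
    (xs.foldl PySem.Set.add S).Sublist (S ++ xs) := by
  induction xs with
  | nil => intro S; simp
  | cons x xs ih =>
    intro S
    simp only [List.foldl_cons]
    refine (ih (PySem.Set.add S x)).trans ?_
    unfold PySem.Set.add
    split
    · exact List.Sublist.append_left (List.sublist_cons_self x xs) S
    · simp

-- sorted of a Python set = ordered dedup of the sorted list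
theorem sorted_ofList_eq (M : List (List Int)) :
    PySem.List.sorted (PySem.Set.ofList M) (fun x => x) false
      = PySem.Set.ofList (PySem.List.sorted M (fun x => x) false) := by
  rw [sorted_inst, sorted_inst]
  have hperm : (PySem.Set.ofList (@PySem.List.sorted (List Int) (List Int) List.instLinearOrder.toLT LinearOrder.toDecidableLT M (fun x => x) false)).Perm (PySem.Set.ofList M) := by
    rw [List.perm_ext_iff_of_nodup (PySem.Set.nodup_ofList _) (PySem.Set.nodup_ofList _)]
    intro a
    rw [PySem.Set.mem_ofList, PySem.Set.mem_ofList, @PySem.List.mem_sorted (List Int) (List Int) List.instLinearOrder.toLT LinearOrder.toDecidableLT M (fun x => x) false a]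
  have hsub : (PySem.Set.ofList (@PySem.List.sorted (List Int) (List Int) List.instLinearOrder.toLT LinearOrder.toDecidableLT M (fun x => x) false)).Sublist
      (@PySem.List.sorted (List Int) (List Int) List.instLinearOrder.toLT LinearOrder.toDecidableLT M (fun x => x) false) := by
    have := foldl_add_sublist (@PySem.List.sorted (List Int) (List Int) List.instLinearOrder.toLT LinearOrder.toDecidableLT M (fun x => x) false) []
    simpa [PySem.Set.ofList_eq_foldl] using this
  have hle : List.Pairwise (fun (a b : List Int) => a ≤ b)
      (PySem.Set.ofList (@PySem.List.sorted (List Int) (List Int) List.instLinearOrder.toLT LinearOrder.toDecidableLT M (fun x => x) false)) :=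
    (PySem.List.sorted_pairwise M (fun x => x)).sublist hsub
  have hne : List.Pairwise (fun (a b : List Int) => a ≠ b)
      (PySem.Set.ofList (@PySem.List.sorted (List Int) (List Int) List.instLinearOrder.toLT LinearOrder.toDecidableLT M (fun x => x) false)) :=
    PySem.Set.nodup_ofList _
  have hpair : List.Pairwise (fun (a b : List Int) => a < b)
      (PySem.Set.ofList (@PySem.List.sorted (List Int) (List Int) List.instLinearOrder.toLT LinearOrder.toDecidableLT M (fun x => x) false)) :=
    (hle.and hne).imp (fun h => lt_of_le_of_ne h.1 h.2)
  exact PySem.List.sorted_eq_of_perm_of_pairwise_lt _ _ _ hperm hpair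

theorem wdomItA_iff (x : List Int) (l : List (List Int)) :
    wdomItA x l = true ↔ ∃ t ∈ l, leB t x = true := by
  rw [wdomItA, List.any_eq_true]
  constructor
  · rintro ⟨t, ht, hw⟩; exact ⟨t, ht, (wdom_iff_leB x t).mp hw⟩
  · rintro ⟨t, ht, hw⟩; exact ⟨t, ht, (wdom_iff_leB x t).mpr hw⟩

-- appending a lex-greater element does not change the dominance predicate on S
theorem pred_ext (S : List (List Int)) (new : List Int)
    (hle : ∀ s ∈ S, s ≤ new) :
    ∀ w ∈ S, (!((S ++ [new]).any (fun u => decide (u < w) && leB u w)))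
            = (!(S.any (fun u => decide (u < w) && leB u w))) := by
  intro w hw
  have hzero : (decide (new < w) && leB new w) = false := by
    by_cases hnw : new < w
    · exact absurd (lt_of_lt_of_le hnw (hle w hw)) (lt_irrefl _)
    · simp [hnw]
  simp [List.any_append, hzero]

-- main invariant induction for A's fold
theorem main_inv (n : Nat) (rest : List (List Int)) :
    ∀ (S res tv : List (List Int)),
    (∀ x ∈ rest, x.length = n) →
    (∀ s ∈ S, s.length = n) →
    List.Pairwise (fun (a b : List Int) => a ≤ b) rest →
    (∀ s ∈ S, ∀ x ∈ rest, s ≤ x) →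
    S.Nodup →
    res = S.filter (fun w => !(S.any (fun u => decide (u < w) && leB u w))) →
    (∀ x : List Int, x.length = n - 1 → (wdomItA x tv = true ↔ ∃ r ∈ res, leB (trA r) x = true)) →
    (∀ w ∈ S, ∃ r ∈ res, leB r w = true) →
    (∀ t ∈ tv, t.length = n - 1) →
    (rest.foldl
      (fun (st : List (List Int) × List (List Int)) new =>
        if wdomItA (trA new) st.2 then st
        else (st.1 ++ [new], updateListItA st.2 (trA new)))
      (res, tv)).1
    = (rest.foldl PySem.Set.add S).filter
        (fun w => !((rest.foldl PySem.Set.add S).any (fun u => decide (u < w) && leB u w))) := by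
  induction rest with
  | nil =>
    intro S res tv _ _ _ _ _ h6 _ _ _
    simpa using h6
  | cons new rest ih =>
    intro S res tv h1 h2 h3 h4 h5 h6 h7 h8 h9
    simp only [List.foldl_cons]
    have hnew : new.length = n := h1 new (List.mem_cons_self ..)
    have hrest : ∀ x ∈ rest, x.length = n := fun x hx => h1 x (List.mem_cons_of_mem _ hx)
    have h3' := (List.pairwise_cons.mp h3).2
    have hnle : ∀ x ∈ rest, new ≤ x := (List.pairwise_cons.mp h3).1
    have hressub : ∀ r ∈ res, r ∈ S := by
      intro r hr; rw [h6] at hr; exact (List.mem_filter.mp hr).1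
    have htr_len : (trA new).length = n - 1 := by rw [trA_eq]; simp [hnew]
    by_cases hc : wdomItA (trA new) tv = true
    · rw [if_pos hc]
      obtain ⟨r, hrres, hrle⟩ := (h7 (trA new) htr_len).mp hc
      by_cases hin : new ∈ S
      · have hadd : PySem.Set.add S new = S := by simp [PySem.Set.add, hin]
        rw [hadd]
        exact ih S res tv hrest h2 h3' (fun s hs x hx => h4 s hs x (List.mem_cons_of_mem _ hx)) h5 h6 h7 h8 h9
      · have hadd : PySem.Set.add S new = S ++ [new] := by simp [PySem.Set.add, hin]
        rw [hadd]
        have hrS := hressub r hrres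
        have hrne : r ≠ new := fun he => hin (he ▸ hrS)
        have hrlen : r.length = new.length := by rw [h2 r hrS, hnew]
        have hlerne : leB r new = true := by
          apply leB_of_le_of_tail hrlen (h4 r hrS new (List.mem_cons_self ..))
          rw [← trA_eq, ← trA_eq]; exact hrle
        have hrlt : r < new := leB_lt hrlen hlerne hrne
        have hpnew : (!((S ++ [new]).any (fun u => decide (u < new) && leB u new))) = false := by
          simp only [Bool.not_eq_false', List.any_eq_true]
          exact ⟨r, List.mem_append_left _ hrS, by simp [hrlt, hlerne]⟩
        apply ih (S ++ [new]) res tv hrest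
        · intro s hs
          rcases List.mem_append.mp hs with hs | hs
          · exact h2 s hs
          · simp at hs; rw [hs]; exact hnew
        · exact h3'
        · intro s hs x hx
          rcases List.mem_append.mp hs with hs | hs
          · exact h4 s hs x (List.mem_cons_of_mem _ hx)
          · simp at hs; rw [hs]; exact hnle x hx
        · simp only [List.nodup_append]
          refine ⟨h5, List.nodup_singleton _, ?_⟩
          simp
          intro a ha hb
          exact hin (hb ▸ ha)
        · rw [List.filter_append, List.filter_congr (pred_ext S new
            (fun s hs => h4 s hs new (List.mem_cons_self ..)))]
          have hone : List.filter (fun w => !((S ++ [new]).any (fun u => decide (u < w) && leB u w))) [new] = [] := by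
            simp only [List.filter_cons, List.filter_nil, hpnew]
            simp
          rw [hone, List.append_nil]
          exact h6
        · exact h7
        · intro w hw
          rcases List.mem_append.mp hw with hw | hw
          · exact h8 w hw
          · simp at hw; rw [hw]; exact ⟨r, hrres, hlerne⟩
        · exact h9
    · rw [if_neg hc]
      have hin : new ∉ S := by
        intro hinS
        obtain ⟨r, hrres, hrle⟩ := h8 new hinS
        exact hc ((h7 (trA new) htr_len).mpr
          ⟨r, hrres, by rw [trA_eq, trA_eq]; exact leB_tail hrle⟩)
      have hadd : PySem.Set.add S new = S ++ [new] := by simp [PySem.Set.add, hin]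
      rw [hadd]
      have hnodom : ∀ u ∈ S, ¬ (leB u new = true) := by
        intro u huS hlb
        obtain ⟨r, hrres, hrle⟩ := h8 u huS
        have hrn : leB r new = true := leB_trans (by rw [h2 r (hressub r hrres), h2 u huS]) hrle hlb
        exact hc ((h7 (trA new) htr_len).mpr
          ⟨r, hrres, by rw [trA_eq, trA_eq]; exact leB_tail hrn⟩)
      have hpnew : (!((S ++ [new]).any (fun u => decide (u < new) && leB u new))) = true := by
        simp only [Bool.not_eq_true', List.any_eq_false]
        intro u hu
        rcases List.mem_append.mp hu with hu | hu
        · by_cases hlb : leB u new = true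
          · exact absurd hlb (hnodom u hu)
          · simp [hlb]
        · simp at hu; rw [hu]; simp
      apply ih (S ++ [new]) (res ++ [new]) (updateListItA tv (trA new)) hrest
      · intro s hs
        rcases List.mem_append.mp hs with hs | hs
        · exact h2 s hs
        · simp at hs; rw [hs]; exact hnew
      · exact h3'
      · intro s hs x hx
        rcases List.mem_append.mp hs with hs | hs
        · exact h4 s hs x (List.mem_cons_of_mem _ hx)
        · simp at hs; rw [hs]; exact hnle x hx
      · simp only [List.nodup_append]
        refine ⟨h5, List.nodup_singleton _, ?_⟩
        simp
        intro a ha hb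
        exact hin (hb ▸ ha)
      · rw [List.filter_append, List.filter_congr (pred_ext S new
          (fun s hs => h4 s hs new (List.mem_cons_self ..)))]
        have hone : List.filter (fun w => !((S ++ [new]).any (fun u => decide (u < w) && leB u w))) [new] = [new] := by
          simp only [List.filter_cons, List.filter_nil, hpnew]
          simp
        rw [hone, h6]
      · intro x hx
        rw [wdomItA_iff]
        constructor
        · rintro ⟨t, ht, htx⟩
          rw [updateListItA] at ht
          rcases List.mem_cons.mp ht with ht | ht
          · exact ⟨new, List.mem_append_right _ (by simp), by rw [← ht]; exact htx⟩
          · have htv := (List.mem_filter.mp ht).1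
            obtain ⟨r, hrres, hr⟩ := (h7 x hx).mp ((wdomItA_iff x tv).mpr ⟨t, htv, htx⟩)
            exact ⟨r, List.mem_append_left _ hrres, hr⟩
        · rintro ⟨r, hr, hrx⟩
          rcases List.mem_append.mp hr with hr | hr
          · obtain ⟨t, htv, htx⟩ := (wdomItA_iff x tv).mp ((h7 x hx).mpr ⟨r, hr, hrx⟩)
            by_cases hble : leB (trA new) t = true
            · refine ⟨trA new, by rw [updateListItA]; exact List.mem_cons_self .., ?_⟩
              exact leB_trans (by rw [htr_len, h9 t htv]) hble htx
            · refine ⟨t, ?_, htx⟩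
              rw [updateListItA]
              apply List.mem_cons_of_mem
              rw [List.mem_filter]
              refine ⟨htv, ?_⟩
              have hwf : wdomA t (trA new) = false := by
                cases hcase : wdomA t (trA new)
                · rfl
                · exact absurd ((wdom_iff_leB t (trA new)).mp hcase) hble
              simp [hwf]
          · simp at hr
            exact ⟨trA new, by rw [updateListItA]; exact List.mem_cons_self .., by rw [hr] at hrx; exact hrx⟩
      · intro w hw
        rcases List.mem_append.mp hw with hw | hw
        · obtain ⟨r, hrres, hr⟩ := h8 w hw
          exact ⟨r, List.mem_append_left _ hrres, hr⟩
        · simp at hw; rw [hw]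
          exact ⟨new, List.mem_append_right _ (by simp), leB_refl new⟩
      · intro t ht
        rw [updateListItA] at ht
        rcases List.mem_cons.mp ht with ht | ht
        · rw [ht]; exact htr_len
        · exact h9 t (List.mem_filter.mp ht).1

theorem comaxB_eq (v1 v2 : List Int) : comaxB v1 v2 = comaxA v1 v2 := rfl

theorem head_nil_of_mem (l : List (List Int))
    (hp : List.Pairwise (fun (a b : List Int) => a ≤ b) l) (hm : ([] : List Int) ∈ l) :
    ∃ t, l = [] :: t := by
  cases l with
  | nil => simp at hm
  | cons h t =>
    rcases List.mem_cons.mp hm with he | hmt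
    · exact ⟨t, by rw [← he]⟩
    · have h1 : h ≤ ([] : List Int) := (List.pairwise_cons.mp hp).1 [] hmt
      have h2 : ([] : List Int) ≤ h := by
        by_contra hcon
        exact absurd (lt_of_not_ge hcon) (List.not_lt_nil h)
      exact ⟨t, by rw [le_antisymm h1 h2]⟩

theorem wdomA_nil_right (x : List Int) : wdomA x [] = true := by
  simp [wdomA, List.zip_nil_right]

theorem foldA_absorb (t : List (List Int)) :
    (t.foldl (fun (st : List (List Int) × List (List Int)) new =>
        if wdomItA (trA new) st.2 then st
        else (st.1 ++ [new], updateListItA st.2 (trA new))) ([[]], [[]]))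
      = ([[]], [[]]) := by
  induction t with
  | nil => rfl
  | cons new t ih =>
    simp only [List.foldl_cons]
    rw [if_pos (show wdomItA (trA new) ((([[]], [[]]) : List (List Int) × List (List Int))).2 = true from by
      simp [wdomItA, wdomA_nil_right])]
    exact ih

-- on inputs with an empty comax vector, both sides return [[]]
theorem ndcomax_empty_A (v1 : List Int) (V2 : List (List Int))
    (hz : ∃ a ∈ V2, min a.length v1.length = 0) : ndcomax v1 V2 = [[]] := by
  obtain ⟨a, ha, hmin⟩ := hz
  have hM : ([] : List Int) ∈ V2.map (fun v2 => comaxA v1 v2) := by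
    refine List.mem_map.mpr ⟨a, ha, ?_⟩
    have hz0 : (v1.zip a).length = 0 := by rw [List.length_zip]; omega
    rw [comaxA, List.eq_nil_of_length_eq_zero hz0]
    rfl
  have hmem : ([] : List Int) ∈ PySem.List.sorted (V2.map (fun v2 => comaxA v1 v2)) (fun x => x) false :=
    (PySem.List.mem_sorted _ _ _ _).mpr hM
  have hp : List.Pairwise (fun (a b : List Int) => a ≤ b)
      (PySem.List.sorted (V2.map (fun v2 => comaxA v1 v2)) (fun x => x) false) := by
    rw [sorted_inst]
    exact PySem.List.sorted_pairwise (V2.map (fun v2 => comaxA v1 v2)) (fun x => x)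
  obtain ⟨t, ht⟩ := head_nil_of_mem _ hp hmem
  unfold ndcomax
  rw [ht]
  simp only [List.foldl_cons]
  rw [if_neg (show ¬ wdomItA (trA []) (([] : List (List Int)), ([] : List (List Int))).2 = true from by
    simp [wdomItA])]
  have hst : (((([] : List (List Int)), ([] : List (List Int))).1 ++ [([] : List Int)],
      updateListItA (([] : List (List Int)), ([] : List (List Int))).2 (trA [])))
      = (([[]], [[]]) : List (List Int) × List (List Int)) := by
    simp [updateListItA, trA_eq]
  rw [hst, foldA_absorb]

theorem ndcomax_empty_B (v1 : List Int) (V2 : List (List Int))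
    (hz : ∃ a ∈ V2, min a.length v1.length = 0) : ndcomax_alt v1 V2 = [[]] := by
  obtain ⟨a, ha, hmin⟩ := hz
  have hM : ([] : List Int) ∈ V2.map (fun v2 => comaxA v1 v2) := by
    refine List.mem_map.mpr ⟨a, ha, ?_⟩
    have hz0 : (v1.zip a).length = 0 := by rw [List.length_zip]; omega
    rw [comaxA, List.eq_nil_of_length_eq_zero hz0]
    rfl
  have hmem : ([] : List Int) ∈ PySem.List.sorted (V2.map (fun v2 => comaxA v1 v2)) (fun x => x) false :=
    (PySem.List.mem_sorted _ _ _ _).mpr hM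
  have hp : List.Pairwise (fun (a b : List Int) => a ≤ b)
      (PySem.List.sorted (V2.map (fun v2 => comaxA v1 v2)) (fun x => x) false) := by
    rw [sorted_inst]
    exact PySem.List.sorted_pairwise (V2.map (fun v2 => comaxA v1 v2)) (fun x => x)
  unfold ndcomax_alt
  simp only [comaxB_eq]
  rw [sorted_ofList_eq]
  have hsub : (PySem.Set.ofList (PySem.List.sorted (V2.map (fun v2 => comaxA v1 v2)) (fun x => x) false)).Sublist
      (PySem.List.sorted (V2.map (fun v2 => comaxA v1 v2)) (fun x => x) false) := by
    simpa [PySem.Set.ofList_eq_foldl] using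
      foldl_add_sublist (PySem.List.sorted (V2.map (fun v2 => comaxA v1 v2)) (fun x => x) false) []
  have hp2 := hp.sublist hsub
  have hnd := PySem.Set.nodup_ofList (PySem.List.sorted (V2.map (fun v2 => comaxA v1 v2)) (fun x => x) false)
  have hmem2 : ([] : List Int) ∈ PySem.Set.ofList (PySem.List.sorted (V2.map (fun v2 => comaxA v1 v2)) (fun x => x) false) :=
    (PySem.Set.mem_ofList _ _).mpr hmem
  obtain ⟨t, ht⟩ := head_nil_of_mem _ hp2 hmem2
  rw [ht]
  rw [ht] at hnd
  have hnotin : ([] : List Int) ∉ t := (List.nodup_cons.mp hnd).1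
  have hp0 : (!(([] :: t).any (fun u => decide (u < ([] : List Int)) && leB u []))) = true := by
    simp only [Bool.not_eq_true', List.any_eq_false]
    intro u _
    simp [List.not_lt_nil u]
  have hrest : List.filter (fun w => !(([] :: t).any (fun u => decide (u < w) && leB u w))) t = [] := by
    rw [List.filter_eq_nil_iff]
    intro w hw
    have hwne : w ≠ [] := fun he => hnotin (he ▸ hw)
    have hlt : ([] : List Int) < w := by
      cases w with
      | nil => exact absurd rfl hwne
      | cons b bs => exact List.Lex.nil
    simp only [Bool.not_eq_true', List.any_eq_false, not_forall]
    refine ⟨[], by simp, ?_⟩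
    simp [hlt]
    rfl
  rw [List.filter_cons, if_pos hp0, hrest]

-- ===== VERDICT (by name: the statement is the Claim_ definition above) =====
theorem ndcomax_spec : Claim_equal_ndcomax := by
  intro v1 V2 _ hpre
  unfold Spec_ndcomax
  by_cases hz : ∃ a ∈ V2, min a.length v1.length = 0
  · rw [ndcomax_empty_A v1 V2 hz, ndcomax_empty_B v1 V2 hz]
  · have huni := hpre.resolve_right hz
    unfold ndcomax ndcomax_alt
    simp only [comaxB_eq]
    have hex : ∃ n, ∀ x ∈ PySem.List.sorted (V2.map (fun v2 => comaxA v1 v2)) (fun x => x) false,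
        x.length = n := by
      cases V2 with
      | nil => exact ⟨0, by intro x hx; rw [PySem.List.mem_sorted] at hx; simp at hx⟩
      | cons v0 V2' =>
        refine ⟨min v0.length v1.length, ?_⟩
        intro x hx
        rw [PySem.List.mem_sorted] at hx
        obtain ⟨a, ha, rfl⟩ := List.mem_map.mp hx
        have hlen : (comaxA v1 a).length = min a.length v1.length := by
          simp [comaxA, List.length_zip, Nat.min_comm]
        rw [hlen, huni a ha v0 (List.mem_cons_self ..)]
    obtain ⟨n, h1⟩ := hex
    have h3 : List.Pairwise (fun (a b : List Int) => a ≤ b)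
        (PySem.List.sorted (V2.map (fun v2 => comaxA v1 v2)) (fun x => x) false) := by
      rw [sorted_inst]
      exact PySem.List.sorted_pairwise (V2.map (fun v2 => comaxA v1 v2)) (fun x => x)
    have hmain := main_inv n (PySem.List.sorted (V2.map (fun v2 => comaxA v1 v2)) (fun x => x) false)
      [] [] [] h1 (by simp) h3 (by simp) (by simp) (by simp)
      (by intro x _; rw [wdomItA_iff]; simp) (by simp) (by simp)
    rw [← PySem.Set.ofList_eq_foldl] at hmain
    rw [hmain, sorted_ofList_eq]
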